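-- pv_equiv track=rewrite | github.com/ngrjchk/Rubiks-Cube-Simulator-and-Solver | Simulators/visual_simulator.py | get_affected_cubie_indices_for_animation
-- ===== SOURCE A (Python) =====
-- def get_affected_cubie_indices_for_animation(move):
--     indices = []; move_upper = move.upper(); center_idx = (1,1,1)
--     if   move_upper == 'U': layer_idx = 0; axis_idx = 1 # j=0
--     elif move_upper == 'D': layer_idx = 2; axis_idx = 1 # j=2
--     elif move_upper == 'L': layer_idx = 0; axis_idx = 2 # k=0
--     elif move_upper == 'R': layer_idx = 2; axis_idx = 2 # k=2
--     elif move_upper == 'B': layer_idx = 0; axis_idx = 0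
--     elif move_upper == 'F': layer_idx = 2; axis_idx = 0
--
--     else: return []
--     for i in range(3):
--         for j in range(3):
--             for k in range(3):
--                 idx_tuple = (i,j,k)
--                 if idx_tuple != center_idx and idx_tuple[axis_idx] == layer_idx:
--                     indices.append(idx_tuple)
--     return indices
-- ===== SOURCE B (Python) =====
-- def get_affected_cubie_indices_for_animation(move):
--     table = {'U': (1, 0), 'D': (1, 2), 'L': (2, 0), 'R': (2, 2), 'B': (0, 0), 'F': (0, 2)}
--     pair = table.get(move.upper())
--     if pair is None:
--         return []
--     axis, val = pair
--     out = []
--     for a in range(3):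
--         for b in range(3):
--             if axis == 0:
--                 out.append((val, a, b))
--             elif axis == 1:
--                 out.append((a, val, b))
--             else:
--                 out.append((a, b, val))
--     return out
-- ===== Notes on version B (the rewrite author's own statement) =====
-- stated objective: simpler
-- what changed: Replaces the if/elif chain plus a 27-iteration triple loop with a dead center-exclusion filter by a move->(fixed_axis, fixed_value) table lookup and a 9-iteration double loop over the two free axes that constructs each tuple directly.
import Mathlib
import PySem

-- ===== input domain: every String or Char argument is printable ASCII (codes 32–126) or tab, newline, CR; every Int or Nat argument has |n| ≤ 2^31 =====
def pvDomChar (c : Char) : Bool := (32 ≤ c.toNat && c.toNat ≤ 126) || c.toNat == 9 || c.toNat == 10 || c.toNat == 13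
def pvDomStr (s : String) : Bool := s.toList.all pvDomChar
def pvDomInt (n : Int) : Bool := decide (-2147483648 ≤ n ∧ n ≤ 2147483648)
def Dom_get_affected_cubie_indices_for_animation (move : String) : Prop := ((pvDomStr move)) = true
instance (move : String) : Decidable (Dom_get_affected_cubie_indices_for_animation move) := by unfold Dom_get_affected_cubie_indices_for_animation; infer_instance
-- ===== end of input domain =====

-- B replaces A's if/elif chain and 27-cell triple loop with a move→(axis, value) table and a
-- 9-cell double loop over the two free axes (objective: simpler; same output, same order).

-- ===== PORT A =====
-- idx_tuple[axis_idx] for axis_idx ∈ {0,1,2}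
def pvTupGet (t : Int × Int × Int) (a : Int) : Int :=
  if a = 0 then t.1 else if a = 1 then t.2.1 else t.2.2

-- the triple loop of A with the center-exclusion and layer filter
def pvLoopA (layer_idx axis_idx : Int) : List (Int × Int × Int) :=
  (PySem.List.pyRange 0 3 1).foldl (fun acc i =>
    (PySem.List.pyRange 0 3 1).foldl (fun acc j =>
      (PySem.List.pyRange 0 3 1).foldl (fun acc k =>
        if (i, j, k) ≠ ((1 : Int), (1 : Int), (1 : Int)) ∧ pvTupGet (i, j, k) axis_idx = layer_idx
        then acc ++ [(i, j, k)] else acc) acc) acc) []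

def get_affected_cubie_indices_for_animation (move : String) : List (Int × Int × Int) :=
  let move_upper := PySem.Str.upper move
  if move_upper = "U" then pvLoopA 0 1
  else if move_upper = "D" then pvLoopA 2 1
  else if move_upper = "L" then pvLoopA 0 2
  else if move_upper = "R" then pvLoopA 2 2
  else if move_upper = "B" then pvLoopA 0 0
  else if move_upper = "F" then pvLoopA 2 0
  else []

-- ===== PORT B =====
def pvTable : PySem.Dict String (Int × Int) :=
  PySem.Dict.mk [("U", (1, 0)), ("D", (1, 2)), ("L", (2, 0)),
                 ("R", (2, 2)), ("B", (0, 0)), ("F", (0, 2))]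

def get_affected_cubie_indices_for_animation_alt (move : String) : List (Int × Int × Int) :=
  match PySem.Dict.get? pvTable (PySem.Str.upper move) with
  | none => []
  | some (axis, val) =>
    (PySem.List.pyRange 0 3 1).foldl (fun acc a =>
      (PySem.List.pyRange 0 3 1).foldl (fun acc b =>
        acc ++ [if axis = 0 then (val, a, b)
                else if axis = 1 then (a, val, b)
                else (a, b, val)]) acc) []

-- ===== PRECONDITION & SPEC =====
def Spec_get_affected_cubie_indices_for_animation (move : String) (out : List (Int × Int × Int)) : Prop := out = get_affected_cubie_indices_for_animation_alt move
instance (move : String) (out : List (Int × Int × Int)) : Decidable (Spec_get_affected_cubie_indices_for_animation move out) := by unfold Spec_get_affected_cubie_indices_for_animation; infer_instance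

-- ===== CLAIM (what is proved, stated in full; the proofs are below) =====
def Claim_equal_get_affected_cubie_indices_for_animation : Prop := ∀ (move : String), Dom_get_affected_cubie_indices_for_animation move → Spec_get_affected_cubie_indices_for_animation move (get_affected_cubie_indices_for_animation move)

-- ===== LEMMAS AND PROOFS =====

-- Both programs depend on the input only through its uppercased form; case on it.
theorem pv_core_eq (u : String) :
    (if u = "U" then pvLoopA 0 1
     else if u = "D" then pvLoopA 2 1
     else if u = "L" then pvLoopA 0 2
     else if u = "R" then pvLoopA 2 2
     else if u = "B" then pvLoopA 0 0
     else if u = "F" then pvLoopA 2 0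
     else []) =
    (match PySem.Dict.get? pvTable u with
     | none => []
     | some (axis, val) =>
       (PySem.List.pyRange 0 3 1).foldl (fun acc a =>
         (PySem.List.pyRange 0 3 1).foldl (fun acc b =>
           acc ++ [if axis = 0 then (val, a, b)
                   else if axis = 1 then (a, val, b)
                   else (a, b, val)]) acc) []) := by
  by_cases h1 : u = "U"; · subst h1; decide
  by_cases h2 : u = "D"; · subst h2; decide
  by_cases h3 : u = "L"; · subst h3; decide
  by_cases h4 : u = "R"; · subst h4; decide
  by_cases h5 : u = "B"; · subst h5; decide
  by_cases h6 : u = "F"; · subst h6; decide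
  have hn : PySem.Dict.get? pvTable u = none := by
    simp [pvTable, PySem.Dict.get?,
          beq_eq_false_iff_ne.mpr (Ne.symm h1), beq_eq_false_iff_ne.mpr (Ne.symm h2),
          beq_eq_false_iff_ne.mpr (Ne.symm h3), beq_eq_false_iff_ne.mpr (Ne.symm h4),
          beq_eq_false_iff_ne.mpr (Ne.symm h5), beq_eq_false_iff_ne.mpr (Ne.symm h6)]
  simp [h1, h2, h3, h4, h5, h6, hn]

-- ===== VERDICT (by name: the statement is the Claim_ definition above) =====
theorem get_affected_cubie_indices_for_animation_spec : Claim_equal_get_affected_cubie_indices_for_animation := by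
  intro move _
  unfold Spec_get_affected_cubie_indices_for_animation
  unfold get_affected_cubie_indices_for_animation get_affected_cubie_indices_for_animation_alt
  exact pv_core_eq (PySem.Str.upper move)
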